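-- pv_equiv track=rewrite | github.com/opensensor/bionpu | src/bionpu/kernels/genomics/primer_scan/__init__.py | _plan_chunks
-- ===== SOURCE A (Python) =====
-- SEQ_IN_CHUNK_BYTES_BASE: int = 4096
--
-- def _plan_chunks(
--     n_input_bytes: int
-- ) -> list[tuple[int, int]]:
--     """Mirror of runner.cpp::plan_chunks.
--
--     Returns ``[(src_offset, payload_bytes), ...]``.
--     """
--     if n_input_bytes == 0:
--         return []
--     overlap_bytes = 8  # PS_OVERLAP_BYTES
--     total_chunk = SEQ_IN_CHUNK_BYTES_BASE + overlap_bytes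
--     # The kernel's seq_in slot is total_chunk (4104) bytes; payload
--     # capacity inside the slot is total_chunk - 24 (header).
--     payload_cap = total_chunk - 24
--     advance = payload_cap - overlap_bytes
--     plan: list[tuple[int, int]] = []
--     off = 0
--     while off < n_input_bytes:
--         end = min(off + payload_cap, n_input_bytes)
--         plan.append((off, end - off))
--         if end >= n_input_bytes:
--             break
--         off += advance
--     return plan
-- ===== SOURCE B (Python) =====
-- def _plan_chunks(n_input_bytes):
--     """Build the plan back-to-front: peel whole strides off the total to
--     locate the final (short) chunk, emit it first, walk the offsets back
--     down to zero emitting full chunks, then reverse."""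
--     if n_input_bytes <= 0:
--         return []
--     payload_cap = 4080
--     advance = 4072
--     m = n_input_bytes
--     while m > payload_cap:
--         m -= advance
--     out = [(n_input_bytes - m, m)]  # the last chunk
--     off = n_input_bytes - m
--     while off > 0:
--         off -= advance
--         out.append((off, payload_cap))
--     out.reverse()
--     return out
-- ===== Notes on version B (the rewrite author's own statement) =====
-- stated objective: alternative
-- what changed: B constructs the plan back-to-front: it first peels whole strides off the total to find the final short chunk, emits it, walks the offsets back down to zero emitting full-capacity chunks, and reverses - instead of A's forward while loop computing min/end with a break.
import Mathlib
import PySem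

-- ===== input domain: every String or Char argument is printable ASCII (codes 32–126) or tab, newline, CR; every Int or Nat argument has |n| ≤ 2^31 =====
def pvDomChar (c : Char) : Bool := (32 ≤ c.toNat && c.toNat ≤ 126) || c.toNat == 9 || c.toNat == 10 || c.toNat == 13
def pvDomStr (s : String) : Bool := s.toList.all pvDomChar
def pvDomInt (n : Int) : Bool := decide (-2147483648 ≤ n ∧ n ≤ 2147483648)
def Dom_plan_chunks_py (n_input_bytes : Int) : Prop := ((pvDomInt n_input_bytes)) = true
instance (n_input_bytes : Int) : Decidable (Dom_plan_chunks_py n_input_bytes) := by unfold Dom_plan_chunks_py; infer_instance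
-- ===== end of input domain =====

-- B builds the chunk plan back-to-front (last short chunk first, then full chunks
-- downward, then reverse) instead of A's forward while/break loop (objective: alternative).

-- ===== PORT A =====
-- A's while loop: off advances by 4072 (= advance) while off < n, emitting
-- (off, end - off) with end = min(off+4080, n), and breaking once end reaches n.
-- payload_cap = (4096 + 8) - 24 = 4080, advance = 4080 - 8 = 4072 (A's constants, inlined).
def planLoopA (n off : Int) : List (Int × Int) :=
  if _h : off < n then
    (off, min (off + 4080) n - off) ::
      (if n ≤ min (off + 4080) n then [] else planLoopA n (off + 4072))
  else []
termination_by (n - off).toNat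
decreasing_by omega

def plan_chunks_py (n_input_bytes : Int) : List (Int × Int) :=
  if n_input_bytes = 0 then []
  else planLoopA n_input_bytes 0

-- ===== PORT B =====
-- first B loop: peel whole strides off the total until the remainder fits one chunk
def reduceB (m : Int) : Int :=
  if 4080 < m then reduceB (m - 4072) else m
termination_by (m - 4080).toNat
decreasing_by omega

-- second B loop: walk offsets back down to zero, appending full-capacity chunks
def backLoopB (off : Int) (out : List (Int × Int)) : List (Int × Int) :=
  if 0 < off then backLoopB (off - 4072) (out ++ [(off - 4072, 4080)]) else out
termination_by off.toNat
decreasing_by omega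

def plan_chunks_py_alt (n_input_bytes : Int) : List (Int × Int) :=
  if n_input_bytes ≤ 0 then []
  else
    let m := reduceB n_input_bytes
    (backLoopB (n_input_bytes - m) [(n_input_bytes - m, m)]).reverse

-- ===== PRECONDITION & SPEC =====
def Spec_plan_chunks_py (n_input_bytes : Int) (out : List (Int × Int)) : Prop := out = plan_chunks_py_alt n_input_bytes
instance (n_input_bytes : Int) (out : List (Int × Int)) : Decidable (Spec_plan_chunks_py n_input_bytes out) := by unfold Spec_plan_chunks_py; infer_instance

-- ===== CLAIM (what is proved, stated in full; the proofs are below) =====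
def Claim_equal_plan_chunks_py : Prop := ∀ (n_input_bytes : Int), Dom_plan_chunks_py n_input_bytes → Spec_plan_chunks_py n_input_bytes (plan_chunks_py n_input_bytes)

-- ===== LEMMAS AND PROOFS =====

-- characterization of reduceB: it subtracts s strides, lands in (0,4080], and (if s>0) above 8
lemma reduceB_char (fuel : Nat) : ∀ n : Int, 0 < n → (n - 4080).toNat ≤ fuel →
    ∃ s : Nat, n - (s : Int) * 4072 = reduceB n ∧ 0 < reduceB n ∧ reduceB n ≤ 4080 ∧
      (8 < reduceB n ∨ s = 0) := by
  induction fuel with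
  | zero =>
    intro n hn hf
    refine ⟨0, ?_, ?_, ?_, Or.inr rfl⟩ <;> rw [reduceB, if_neg (by omega)] <;> omega
  | succ f ih =>
    intro n hn hf
    by_cases h : 4080 < n
    · obtain ⟨s, hs, h1, h2, h3⟩ := ih (n - 4072) (by omega) (by omega)
      rw [reduceB, if_pos h]
      exact ⟨s + 1, by push_cast; omega, h1, h2, Or.inl (by omega)⟩
    · refine ⟨0, ?_, ?_, ?_, Or.inr rfl⟩ <;> rw [reduceB, if_neg h] <;> omega

-- shift invariance of A's loop
lemma shiftA (fuel : Nat) : ∀ n off : Int, (n - off).toNat ≤ fuel →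
    planLoopA n off = (planLoopA (n - 4072) (off - 4072)).map (fun p => (p.1 + 4072, p.2)) := by
  induction fuel with
  | zero =>
    intro n off hf
    rw [planLoopA, dif_neg (by omega), planLoopA, dif_neg (by omega)]
    simp
  | succ f ih =>
    intro n off hf
    by_cases h : off < n
    · have h' : off - 4072 < n - 4072 := by omega
      conv_lhs => rw [planLoopA]
      conv_rhs => rw [planLoopA]
      rw [dif_pos h, dif_pos h']
      by_cases hb : n ≤ min (off + 4080) n
      · rw [if_pos hb,
          if_pos (show n - 4072 ≤ min (off - 4072 + 4080) (n - 4072) by omega)]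
        simp only [List.map_cons, List.map_nil, List.cons.injEq, Prod.mk.injEq]
        refine ⟨⟨by omega, by omega⟩, by trivial⟩
      · rw [if_neg hb,
          if_neg (show ¬ n - 4072 ≤ min (off - 4072 + 4080) (n - 4072) by omega)]
        rw [ih n (off + 4072) (by omega)]
        rw [show off + 4072 - 4072 = off - 4072 + 4072 by ring]
        simp only [List.map_cons, List.cons.injEq, Prod.mk.injEq]
        refine ⟨⟨by omega, by omega⟩, by trivial⟩
    · rw [planLoopA, dif_neg h, planLoopA, dif_neg (by omega)]
      simp

-- A's loop from 0, on n = m + s*4072 with the base-chunk m, equals the canonical list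
set_option maxRecDepth 4096 in
lemma loopA_canon (s : Nat) : ∀ n m : Int, n = m + (s : Int) * 4072 → 0 < m → m ≤ 4080 →
    (8 < m ∨ s = 0) →
    planLoopA n 0 =
      ((List.range s).map (fun (i : Nat) => ((i : Int) * 4072, (4080 : Int)))) ++ [((s : Int) * 4072, m)] := by
  induction s with
  | zero =>
    intro n m hn h1 h2 _
    rw [planLoopA, dif_pos (by omega)]
    rw [if_pos (by omega : n ≤ min (0 + 4080) n)]
    simp
    omega
  | succ s ih =>
    intro n m hn h1 h2 h3
    have hm8 : 8 < m := by rcases h3 with h | h <;> omega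
    have hbig : 4080 < n := by push_cast at hn; omega
    rw [planLoopA, dif_pos (by omega)]
    rw [if_neg (by omega : ¬ n ≤ min (0 + 4080) n)]
    rw [show (0 : Int) + 4072 = 4072 by norm_num]
    rw [shiftA (n - 4072).toNat n 4072 (by omega)]
    have harg : (4072 : Int) - 4072 = 0 := by norm_num
    rw [harg, ih (n - 4072) m (by push_cast at hn ⊢; omega) h1 h2 (Or.inl hm8)]
    rw [List.range_succ_eq_map]
    simp only [List.map_cons, List.map_append, List.map_map, List.cons_append]
    rw [List.cons.injEq]
    refine ⟨?_, ?_⟩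
    · rw [min_eq_left (by omega : (0 : Int) + 4080 ≤ n)]
      norm_num
    · have hmap :
          List.map ((fun p : Int × Int => (p.1 + 4072, p.2)) ∘
              fun (i : Nat) => ((i : Int) * 4072, (4080 : Int))) (List.range s) =
            List.map ((fun (i : Nat) => ((i : Int) * 4072, (4080 : Int))) ∘ Nat.succ)
              (List.range s) := by
        apply List.map_congr_left
        intro i _
        simp only [Function.comp_apply, Nat.succ_eq_add_one, Prod.mk.injEq,
          Nat.cast_add, Nat.cast_one]
        exact ⟨by ring, trivial⟩
      rw [hmap]
      have hy : ((s : Int) * 4072 + 4072, m) = ((((s : Nat) + 1 : Nat) : Int) * 4072, m) := by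
        simp only [Prod.mk.injEq, Nat.cast_add, Nat.cast_one]
        exact ⟨by ring, trivial⟩
      rw [hy, List.map_nil]

-- B's backward loop appends full chunks for offsets (s-1)*4072 … 0 in that order
lemma backLoopB_canon (s : Nat) : ∀ out : List (Int × Int),
    backLoopB ((s : Int) * 4072) out =
      out ++ ((List.range s).map (fun (i : Nat) => ((i : Int) * 4072, (4080 : Int)))).reverse := by
  induction s with
  | zero => intro out; rw [backLoopB, if_neg (by omega)]; simp
  | succ s ih =>
    intro out
    rw [backLoopB, if_pos (by push_cast; omega)]
    have harg : ((s : Int) + 1) * 4072 - 4072 = (s : Int) * 4072 := by ring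
    push_cast
    rw [harg, ih]
    rw [List.range_succ]
    simp

theorem plan_chunks_py_eq (n : Int) : plan_chunks_py n = plan_chunks_py_alt n := by
  unfold plan_chunks_py plan_chunks_py_alt
  rcases lt_trichotomy n 0 with h | h | h
  · rw [if_neg (by omega : n ≠ 0), if_pos (by omega : n ≤ 0), planLoopA, dif_neg (by omega)]
  · simp [h]
  · rw [if_neg (by omega : n ≠ 0), if_neg (by omega : ¬ n ≤ 0)]
    obtain ⟨s, hs, h1, h2, h3⟩ := reduceB_char (n - 4080).toNat n h le_rfl
    have hnm : n - reduceB n = (s : Int) * 4072 := by omega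
    rw [loopA_canon s n (reduceB n) (by omega) h1 h2 h3]
    show _ = (backLoopB (n - reduceB n) [(n - reduceB n, reduceB n)]).reverse
    rw [hnm, backLoopB_canon s]
    simp

-- ===== VERDICT (by name: the statement is the Claim_ definition above) =====
theorem plan_chunks_py_spec : Claim_equal_plan_chunks_py := by
  intro n _
  unfold Spec_plan_chunks_py
  exact plan_chunks_py_eq n
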